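-- pv_equiv track=rewrite | github.com/Only-Wion/TextRPG | game/service/pack_builder_agent.py | _has_unclosed_json_brackets
-- ===== SOURCE A (Python) =====
-- def _has_unclosed_json_brackets(text: str) -> bool:
--     content = text.strip()
--     if content.startswith("```"):
--         content = content.strip("`")
--         if content.startswith("json"):
--             content = content[4:].strip()
--
--     in_string = False
--     escaped = False
--     braces = 0
--     brackets = 0
--     for ch in content:
--         if in_string:
--             if escaped:
--                 escaped = False
--                 continue
--             if ch == "\\":
--                 escaped = True
--                 continue
--             if ch == '"':
--                 in_string = False
--             continue
--
--         if ch == '"':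
--             in_string = True
--         elif ch == "{":
--             braces += 1
--         elif ch == "}":
--             braces -= 1
--         elif ch == "[":
--             brackets += 1
--         elif ch == "]":
--             brackets -= 1
--
--         if braces < 0 or brackets < 0:
--             return False
--     return in_string or braces > 0 or brackets > 0
-- ===== SOURCE B (Python) =====
-- def _has_unclosed_json_brackets(text: str) -> bool:
--     content = text.strip()
--     if content.startswith("```"):
--         content = content.strip("`")
--         if content.startswith("json"):
--             content = content[4:].strip()
--
--     # Pass 1: drop string-literal contents, keeping only the structural
--     # brackets that occur outside strings, plus a trailing-unterminated flag.
--     structural = []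
--     in_string = False
--     escaped = False
--     for ch in content:
--         if in_string:
--             if escaped:
--                 escaped = False
--             elif ch == "\\":
--                 escaped = True
--             elif ch == '"':
--                 in_string = False
--         elif ch == '"':
--             in_string = True
--         elif ch in "{}[]":
--             structural.append(ch)
--
--     # Pass 2: independent counters over the reduced sequence.
--     braces = 0
--     brackets = 0
--     for ch in structural:
--         if ch == "{":
--             braces += 1
--         elif ch == "}":
--             braces -= 1
--         elif ch == "[":
--             brackets += 1
--         else:
--             brackets -= 1
--         if braces < 0 or brackets < 0:
--             return False
--     return in_string or braces > 0 or brackets > 0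
-- ===== Notes on version B (the rewrite author's own statement) =====
-- stated objective: alternative
-- what changed: A's single fused four-state loop is split into two passes: one that strips string-literal contents to an ordered list of structural brackets plus an unterminated-string flag, and one that runs the independent brace/bracket counters over that reduced sequence.
import Mathlib
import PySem

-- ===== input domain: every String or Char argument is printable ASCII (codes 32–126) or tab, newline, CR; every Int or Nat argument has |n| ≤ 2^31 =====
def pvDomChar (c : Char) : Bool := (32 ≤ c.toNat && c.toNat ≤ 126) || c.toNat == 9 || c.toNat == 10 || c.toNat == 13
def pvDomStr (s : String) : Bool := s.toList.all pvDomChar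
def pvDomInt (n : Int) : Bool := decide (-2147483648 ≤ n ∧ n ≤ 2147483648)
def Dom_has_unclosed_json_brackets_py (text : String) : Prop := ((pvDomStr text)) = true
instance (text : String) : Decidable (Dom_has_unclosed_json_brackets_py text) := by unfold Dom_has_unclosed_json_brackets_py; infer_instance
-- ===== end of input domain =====

-- B replaces A's single four-state loop by two passes (strip string literals, then count
-- the reduced structural sequence); objective: alternative decomposition, same cost.

-- ===== PORT A =====
-- A's single loop over the content: state (in_string, escaped, braces, brackets),
-- early `return False` when a counter goes negative.
def pvA_loop : List Char → Bool → Bool → Int → Int → Bool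
  | [], inStr, _, braces, brackets => inStr || braces > 0 || brackets > 0
  | ch :: rest, inStr, esc, braces, brackets =>
    if inStr then
      if esc then pvA_loop rest inStr false braces brackets
      else if ch = '\\' then pvA_loop rest inStr true braces brackets
      else if ch = '"' then pvA_loop rest false esc braces brackets
      else pvA_loop rest inStr esc braces brackets
    else
      let inStr' := if ch = '"' then true else inStr
      let braces' := if ch = '"' then braces
        else if ch = '{' then braces + 1
        else if ch = '}' then braces - 1
        else braces
      let brackets' := if ch = '"' then brackets
        else if ch = '[' then brackets + 1
        else if ch = ']' then brackets - 1
        else brackets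
      if braces' < 0 || brackets' < 0 then false
      else pvA_loop rest inStr' esc braces' brackets'

def has_unclosed_json_brackets_py (text : String) : Bool :=
  let content := PySem.Str.strip text
  let content :=
    if PySem.Str.startswith content "```" then
      let c := PySem.Str.stripChars content "`"
      if PySem.Str.startswith c "json" then PySem.Str.strip (PySem.Str.slice c (some 4) none)
      else c
    else content
  pvA_loop content.toList false false 0 0

-- ===== PORT B =====
-- Pass 1: strip string-literal contents; return the structural brackets outside
-- strings (in order) and the unterminated-trailing-string flag.
def pvB_pass1 : List Char → Bool → Bool → (List Char × Bool)
  | [], inStr, _ => ([], inStr)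
  | ch :: rest, inStr, esc =>
    if inStr then
      if esc then pvB_pass1 rest inStr false
      else if ch = '\\' then pvB_pass1 rest inStr true
      else if ch = '"' then pvB_pass1 rest false esc
      else pvB_pass1 rest inStr esc
    else if ch = '"' then pvB_pass1 rest true esc
    else if ch = '{' ∨ ch = '}' ∨ ch = '[' ∨ ch = ']' then
      let p := pvB_pass1 rest inStr esc
      (ch :: p.1, p.2)
    else pvB_pass1 rest inStr esc

-- Pass 2: independent brace/bracket counters over the reduced sequence.
def pvB_pass2 : List Char → Int → Int → Bool → Bool
  | [], braces, brackets, f => f || braces > 0 || brackets > 0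
  | ch :: rest, braces, brackets, f =>
    let braces' := if ch = '{' then braces + 1 else if ch = '}' then braces - 1 else braces
    let brackets' := if ch = '[' then brackets + 1 else if ch = ']' then brackets - 1 else brackets
    if braces' < 0 || brackets' < 0 then false
    else pvB_pass2 rest braces' brackets' f

def has_unclosed_json_brackets_py_alt (text : String) : Bool :=
  let content := PySem.Str.strip text
  let content :=
    if PySem.Str.startswith content "```" then
      let c := PySem.Str.stripChars content "`"
      if PySem.Str.startswith c "json" then PySem.Str.strip (PySem.Str.slice c (some 4) none)
      else c
    else content
  let p := pvB_pass1 content.toList false false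
  pvB_pass2 p.1 0 0 p.2

-- ===== PRECONDITION & SPEC =====
def Spec_has_unclosed_json_brackets_py (text : String) (out : Bool) : Prop := out = has_unclosed_json_brackets_py_alt text
instance (text : String) (out : Bool) : Decidable (Spec_has_unclosed_json_brackets_py text out) := by unfold Spec_has_unclosed_json_brackets_py; infer_instance

-- ===== CLAIM (what is proved, stated in full; the proofs are below) =====
def Claim_equal_has_unclosed_json_brackets_py : Prop := ∀ (text : String), Dom_has_unclosed_json_brackets_py text → Spec_has_unclosed_json_brackets_py text (has_unclosed_json_brackets_py text)

-- ===== LEMMAS AND PROOFS =====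

-- The key invariant: starting from nonnegative counters, A's fused loop equals
-- B's pass1 followed by pass2 from the same state.
theorem pvA_eq_passes (chars : List Char) : ∀ (inStr esc : Bool) (braces brackets : Int),
    0 ≤ braces → 0 ≤ brackets →
    pvA_loop chars inStr esc braces brackets =
      pvB_pass2 (pvB_pass1 chars inStr esc).1 braces brackets (pvB_pass1 chars inStr esc).2 := by
  induction chars with
  | nil => intro inStr esc braces brackets _ _; simp [pvA_loop, pvB_pass1, pvB_pass2]
  | cons ch rest ih =>
    intro inStr esc braces brackets hb hk
    by_cases hs : inStr = true
    · subst hs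
      by_cases he : esc = true
      · subst he; simp [pvA_loop, pvB_pass1, ih _ _ _ _ hb hk]
      · simp only [Bool.not_eq_true] at he; subst he
        by_cases h1 : ch = '\\'
        · simp [pvA_loop, pvB_pass1, h1, ih _ _ _ _ hb hk]
        · by_cases h2 : ch = '"'
          · simp [pvA_loop, pvB_pass1, h2, ih _ _ _ _ hb hk]
          · simp [pvA_loop, pvB_pass1, h1, h2, ih _ _ _ _ hb hk]
    · simp only [Bool.not_eq_true] at hs; subst hs
      by_cases h2 : ch = '"'
      · have hneg : ¬ (braces < 0 || brackets < 0) = true := by simp; omega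
        simp [pvA_loop, pvB_pass1, h2, hneg, ih _ _ braces brackets hb hk]
      · by_cases hob : ch = '{'
        · subst hob
          have hneg : ¬ (braces + 1 < 0 || brackets < 0) = true := by simp; omega
          simp [pvA_loop, pvB_pass1, pvB_pass2, hneg,
            ih _ _ (braces + 1) brackets (by omega) hk]
        · by_cases hcb : ch = '}'
          · subst hcb
            by_cases hlt : braces - 1 < 0
            · have hlt' : braces < 1 := by omega
              simp [pvA_loop, pvB_pass1, pvB_pass2, hlt']
            · simp [pvA_loop, pvB_pass1, pvB_pass2,
                ih _ _ (braces - 1) brackets (by omega) hk]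
          · by_cases hok : ch = '['
            · subst hok
              have hneg : ¬ (braces < 0 || brackets + 1 < 0) = true := by simp; omega
              simp [pvA_loop, pvB_pass1, pvB_pass2, hneg,
                ih _ _ braces (brackets + 1) hb (by omega)]
            · by_cases hck : ch = ']'
              · subst hck
                by_cases hlt : brackets - 1 < 0
                · have hlt' : brackets < 1 := by omega
                  simp [pvA_loop, pvB_pass1, pvB_pass2, hlt']
                · simp [pvA_loop, pvB_pass1, pvB_pass2,
                    ih _ _ braces (brackets - 1) hb (by omega)]
              · have hneg : ¬ (braces < 0 || brackets < 0) = true := by simp; omega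
                simp [pvA_loop, pvB_pass1, h2, hob, hcb, hok, hck, hneg,
                  ih _ _ braces brackets hb hk]

-- ===== VERDICT (by name: the statement is the Claim_ definition above) =====
theorem has_unclosed_json_brackets_py_spec : Claim_equal_has_unclosed_json_brackets_py := by
  intro text _
  unfold Spec_has_unclosed_json_brackets_py has_unclosed_json_brackets_py has_unclosed_json_brackets_py_alt
  exact pvA_eq_passes _ _ _ _ _ le_rfl le_rfl
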